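-- pv_equiv track=rewrite | github.com/Raeinf/Traffic-Solver-Using-A-Algorithm | main.py | is_vehicle_blocked
-- ===== SOURCE A (Python) =====
-- def is_vehicle_blocked(vehicles, vehicle, direction, height, width):
--     row, col, orientation, length = vehicle
--     if orientation == 'h':
--         if direction == 'left':
--             if col <= 1:
--                 return True
--             return any(
--                 other_vehicle != vehicle and (
--                     (other_vehicle[2] == 'h' and other_vehicle[0] == row and other_vehicle[1] + other_vehicle[3] == col) or
--                     (other_vehicle[2] == 'v' and other_vehicle[0] <= row < other_vehicle[0] + other_vehicle[3] and other_vehicle[1] == col - 1)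
--                 ) for other_vehicle in vehicles
--             )
--         elif direction == 'right':
--             if col + length > width:
--                 return True
--             return any(
--                 other_vehicle != vehicle and (
--                     (other_vehicle[2] == 'h' and other_vehicle[0] == row and col + length == other_vehicle[1]) or
--                     (other_vehicle[2] == 'v' and other_vehicle[0] <= row < other_vehicle[0] + other_vehicle[3] and other_vehicle[1] == col + length)
--                 ) for other_vehicle in vehicles
--             )
--     elif orientation == 'v':
--         if direction == 'up':
--             if row <= 1:
--                 return True
--             return any(
--                 other_vehicle != vehicle and (
--                     (other_vehicle[2] == 'v' and other_vehicle[1] == col and other_vehicle[0] + other_vehicle[3] == row) or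
--                     (other_vehicle[2] == 'h' and other_vehicle[1] <= col < other_vehicle[1] + other_vehicle[3] and other_vehicle[0] == row - 1)
--                 ) for other_vehicle in vehicles
--             )
--         elif direction == 'down':
--             if row + length > height:
--                 return True
--             return any(
--                 other_vehicle != vehicle and (
--                     (other_vehicle[2] == 'v' and other_vehicle[1] == col and row + length == other_vehicle[0]) or
--                     (other_vehicle[2] == 'h' and other_vehicle[1] <= col < other_vehicle[1] + other_vehicle[3] and other_vehicle[0] == row + length)
--                 ) for other_vehicle in vehicles
--             )
--     return False
-- ===== SOURCE B (Python) =====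
-- # Symmetry reduction: transpose/reflect the board so every direction becomes a single
-- # "move left" kernel; same O(n) cost, one scan body instead of four.
--
-- def _transpose(v):
--     r, c, o, ln = v
--     o2 = 'v' if o == 'h' else ('h' if o == 'v' else o)
--     return (c, r, o2, ln)
--
--
-- def _reflect(width, v):
--     r, c, o, ln = v
--     if o == 'h':
--         return (r, width + 2 - c - ln, o, ln)
--     if o == 'v':
--         return (r, width + 1 - c, o, ln)
--     return v
--
--
-- def _blocked_left(vehicles, vehicle):
--     row, col = vehicle[0], vehicle[1]
--     if col <= 1:
--         return True
--     return any(
--         ov != vehicle and (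
--             (ov[2] == 'h' and ov[0] == row and ov[1] + ov[3] == col) or
--             (ov[2] == 'v' and ov[0] <= row < ov[0] + ov[3] and ov[1] == col - 1)
--         ) for ov in vehicles
--     )
--
--
-- def is_vehicle_blocked(vehicles, vehicle, direction, height, width):
--     orientation = vehicle[2]
--     if orientation == 'v':
--         if direction == 'up' or direction == 'down':
--             tv = [_transpose(v) for v in vehicles]
--             t = _transpose(vehicle)
--             if direction == 'down':
--                 return _blocked_left([_reflect(height, v) for v in tv], _reflect(height, t))
--             return _blocked_left(tv, t)
--         return False
--     if orientation == 'h':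
--         if direction == 'left':
--             return _blocked_left(vehicles, vehicle)
--         if direction == 'right':
--             return _blocked_left([_reflect(width, v) for v in vehicles], _reflect(width, vehicle))
--         return False
--     return False
-- ===== Notes on version B (the rewrite author's own statement) =====
-- stated objective: alternative
-- what changed: B uses symmetry reduction: it transposes the board for vertical vehicles (up/down become left/right) and mirrors the columns for forward moves (right/down become left), so one single 'blocked moving left' kernel replaces A's four separately hand-written per-direction scans; the transforms are exact integer bijections, so each of A's branch conditions maps verbatim onto the kernel's.
import Mathlib
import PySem

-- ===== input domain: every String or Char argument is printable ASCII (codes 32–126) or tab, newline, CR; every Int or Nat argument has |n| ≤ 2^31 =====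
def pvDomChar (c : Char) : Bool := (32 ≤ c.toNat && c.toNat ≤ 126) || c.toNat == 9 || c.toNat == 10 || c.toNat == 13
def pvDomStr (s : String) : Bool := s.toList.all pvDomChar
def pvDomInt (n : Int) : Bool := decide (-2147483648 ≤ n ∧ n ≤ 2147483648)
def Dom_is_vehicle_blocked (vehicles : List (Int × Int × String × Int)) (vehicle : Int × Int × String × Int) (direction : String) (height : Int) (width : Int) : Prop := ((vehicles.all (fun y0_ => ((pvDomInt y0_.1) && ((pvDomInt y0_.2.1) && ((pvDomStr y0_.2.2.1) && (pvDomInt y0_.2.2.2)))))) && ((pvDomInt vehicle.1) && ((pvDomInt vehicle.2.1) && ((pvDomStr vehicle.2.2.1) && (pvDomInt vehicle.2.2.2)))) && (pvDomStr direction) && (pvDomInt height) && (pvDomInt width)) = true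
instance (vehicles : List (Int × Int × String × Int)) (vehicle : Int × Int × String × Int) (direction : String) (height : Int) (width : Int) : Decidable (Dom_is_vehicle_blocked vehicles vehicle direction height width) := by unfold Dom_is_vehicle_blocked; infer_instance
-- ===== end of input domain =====

-- B reduces all four directions by symmetry (transpose for vertical, reflect for forward moves)
-- to a single "move left" kernel; objective: alternative decomposition, same O(n) cost.

-- ===== PORT A =====
def is_vehicle_blocked (vehicles : List (Int × Int × String × Int)) (vehicle : Int × Int × String × Int) (direction : String) (height : Int) (width : Int) : Bool :=
  let row := vehicle.1; let col := vehicle.2.1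
  let orientation := vehicle.2.2.1; let length := vehicle.2.2.2
  if orientation == "h" then
    if direction == "left" then
      if col ≤ 1 then true
      else vehicles.any (fun ov =>
        ov != vehicle && (
          (ov.2.2.1 == "h" && ov.1 == row && ov.2.1 + ov.2.2.2 == col) ||
          (ov.2.2.1 == "v" && decide (ov.1 ≤ row) && decide (row < ov.1 + ov.2.2.2) && ov.2.1 == col - 1)))
    else if direction == "right" then
      if col + length > width then true
      else vehicles.any (fun ov =>
        ov != vehicle && (
          (ov.2.2.1 == "h" && ov.1 == row && col + length == ov.2.1) ||
          (ov.2.2.1 == "v" && decide (ov.1 ≤ row) && decide (row < ov.1 + ov.2.2.2) && ov.2.1 == col + length)))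
    else false
  else if orientation == "v" then
    if direction == "up" then
      if row ≤ 1 then true
      else vehicles.any (fun ov =>
        ov != vehicle && (
          (ov.2.2.1 == "v" && ov.2.1 == col && ov.1 + ov.2.2.2 == row) ||
          (ov.2.2.1 == "h" && decide (ov.2.1 ≤ col) && decide (col < ov.2.1 + ov.2.2.2) && ov.1 == row - 1)))
    else if direction == "down" then
      if row + length > height then true
      else vehicles.any (fun ov =>
        ov != vehicle && (
          (ov.2.2.1 == "v" && ov.2.1 == col && row + length == ov.1) ||
          (ov.2.2.1 == "h" && decide (ov.2.1 ≤ col) && decide (col < ov.2.1 + ov.2.2.2) && ov.1 == row + length)))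
    else false
  else false

-- ===== PORT B =====
-- swap rows and columns (and the two orientations)
def pvTranspose (v : Int × Int × String × Int) : Int × Int × String × Int :=
  (v.2.1, v.1, if v.2.2.1 == "h" then "v" else if v.2.2.1 == "v" then "h" else v.2.2.1, v.2.2.2)

-- mirror the columns of a board of the given width
def pvReflect (width : Int) (v : Int × Int × String × Int) : Int × Int × String × Int :=
  if v.2.2.1 == "h" then (v.1, width + 2 - v.2.1 - v.2.2.2, v.2.2.1, v.2.2.2)
  else if v.2.2.1 == "v" then (v.1, width + 1 - v.2.1, v.2.2.1, v.2.2.2)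
  else v

-- the single kernel: can `vehicle` (assumed horizontal) not move one cell left?
def pvBlockedLeft (vehicles : List (Int × Int × String × Int)) (vehicle : Int × Int × String × Int) : Bool :=
  let row := vehicle.1; let col := vehicle.2.1
  if col ≤ 1 then true
  else vehicles.any (fun ov =>
    ov != vehicle && (
      (ov.2.2.1 == "h" && ov.1 == row && ov.2.1 + ov.2.2.2 == col) ||
      (ov.2.2.1 == "v" && decide (ov.1 ≤ row) && decide (row < ov.1 + ov.2.2.2) && ov.2.1 == col - 1)))

def is_vehicle_blocked_alt (vehicles : List (Int × Int × String × Int)) (vehicle : Int × Int × String × Int) (direction : String) (height : Int) (width : Int) : Bool :=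
  let orientation := vehicle.2.2.1
  if orientation == "v" then
    if direction == "up" || direction == "down" then
      let tv := vehicles.map pvTranspose
      let t := pvTranspose vehicle
      if direction == "down" then
        pvBlockedLeft (tv.map (pvReflect height)) (pvReflect height t)
      else pvBlockedLeft tv t
    else false
  else if orientation == "h" then
    if direction == "left" then pvBlockedLeft vehicles vehicle
    else if direction == "right" then
      pvBlockedLeft (vehicles.map (pvReflect width)) (pvReflect width vehicle)
    else false
  else false

-- ===== PRECONDITION & SPEC =====
def Spec_is_vehicle_blocked (vehicles : List (Int × Int × String × Int)) (vehicle : Int × Int × String × Int) (direction : String) (height : Int) (width : Int) (out : Bool) : Prop := out = is_vehicle_blocked_alt vehicles vehicle direction height width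
instance (vehicles : List (Int × Int × String × Int)) (vehicle : Int × Int × String × Int) (direction : String) (height : Int) (width : Int) (out : Bool) : Decidable (Spec_is_vehicle_blocked vehicles vehicle direction height width out) := by unfold Spec_is_vehicle_blocked; infer_instance

-- ===== CLAIM (what is proved, stated in full; the proofs are below) =====
def Claim_equal_is_vehicle_blocked : Prop := ∀ (vehicles : List (Int × Int × String × Int)) (vehicle : Int × Int × String × Int) (direction : String) (height : Int) (width : Int), Dom_is_vehicle_blocked vehicles vehicle direction height width → Spec_is_vehicle_blocked vehicles vehicle direction height width (is_vehicle_blocked vehicles vehicle direction height width)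

-- ===== LEMMAS AND PROOFS =====

-- pointwise: the right-branch predicate of A equals the kernel predicate after reflection
lemma pv_right_pt (row col length width : Int) (ov : Int × Int × String × Int) :
    ((ov != (row, col, "h", length)) && (
      (ov.2.2.1 == "h" && ov.1 == row && col + length == ov.2.1) ||
      (ov.2.2.1 == "v" && decide (ov.1 ≤ row) && decide (row < ov.1 + ov.2.2.2) && ov.2.1 == col + length)))
    = ((pvReflect width ov != (row, width + 2 - col - length, "h", length)) && (
      ((pvReflect width ov).2.2.1 == "h" && (pvReflect width ov).1 == row &&
        (pvReflect width ov).2.1 + (pvReflect width ov).2.2.2 == width + 2 - col - length) ||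
      ((pvReflect width ov).2.2.1 == "v" && decide ((pvReflect width ov).1 ≤ row) &&
        decide (row < (pvReflect width ov).1 + (pvReflect width ov).2.2.2) &&
        (pvReflect width ov).2.1 == width + 2 - col - length - 1))) := by
  obtain ⟨r, c, o, ln⟩ := ov
  simp only [pvReflect]
  rw [Bool.eq_iff_iff]
  by_cases h1 : o = "h" <;> by_cases h2 : o = "v" <;>
    simp [h1, h2, Prod.ext_iff] <;> omega

-- pointwise: the up-branch predicate of A equals the kernel predicate after transposition
lemma pv_up_pt (row col length : Int) (ov : Int × Int × String × Int) :
    ((ov != (row, col, "v", length)) && (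
      (ov.2.2.1 == "v" && ov.2.1 == col && ov.1 + ov.2.2.2 == row) ||
      (ov.2.2.1 == "h" && decide (ov.2.1 ≤ col) && decide (col < ov.2.1 + ov.2.2.2) && ov.1 == row - 1)))
    = ((pvTranspose ov != (col, row, "h", length)) && (
      ((pvTranspose ov).2.2.1 == "h" && (pvTranspose ov).1 == col &&
        (pvTranspose ov).2.1 + (pvTranspose ov).2.2.2 == row) ||
      ((pvTranspose ov).2.2.1 == "v" && decide ((pvTranspose ov).1 ≤ col) &&
        decide (col < (pvTranspose ov).1 + (pvTranspose ov).2.2.2) &&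
        (pvTranspose ov).2.1 == row - 1))) := by
  obtain ⟨r, c, o, ln⟩ := ov
  simp only [pvTranspose]
  rw [Bool.eq_iff_iff]
  by_cases h1 : o = "h" <;> by_cases h2 : o = "v" <;>
    simp [h1, h2, Prod.ext_iff] <;> omega

-- pointwise: the down-branch predicate of A equals the kernel predicate after transpose + reflect
lemma pv_down_pt (row col length height : Int) (ov : Int × Int × String × Int) :
    ((ov != (row, col, "v", length)) && (
      (ov.2.2.1 == "v" && ov.2.1 == col && row + length == ov.1) ||
      (ov.2.2.1 == "h" && decide (ov.2.1 ≤ col) && decide (col < ov.2.1 + ov.2.2.2) && ov.1 == row + length)))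
    = ((pvReflect height (pvTranspose ov) != (col, height + 2 - row - length, "h", length)) && (
      ((pvReflect height (pvTranspose ov)).2.2.1 == "h" && (pvReflect height (pvTranspose ov)).1 == col &&
        (pvReflect height (pvTranspose ov)).2.1 + (pvReflect height (pvTranspose ov)).2.2.2 == height + 2 - row - length) ||
      ((pvReflect height (pvTranspose ov)).2.2.1 == "v" && decide ((pvReflect height (pvTranspose ov)).1 ≤ col) &&
        decide (col < (pvReflect height (pvTranspose ov)).1 + (pvReflect height (pvTranspose ov)).2.2.2) &&
        (pvReflect height (pvTranspose ov)).2.1 == height + 2 - row - length - 1))) := by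
  obtain ⟨r, c, o, ln⟩ := ov
  simp only [pvTranspose, pvReflect]
  rw [Bool.eq_iff_iff]
  by_cases h1 : o = "h" <;> by_cases h2 : o = "v" <;>
    simp [h1, h2, Prod.ext_iff] <;> omega

lemma pv_any_congr {α : Type} (l : List α) (p q : α → Bool) (h : ∀ a, p a = q a) :
    l.any p = l.any q := by
  induction l with
  | nil => rfl
  | cons x xs ih => rw [List.any_cons, List.any_cons, h x, ih]

-- branch lemma: A's right branch equals the kernel on the reflected board
lemma pv_right_case (vehicles : List (Int × Int × String × Int)) (row col length width : Int) :
    (if col + length > width then true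
     else vehicles.any (fun ov =>
        ov != (row, col, "h", length) && (
          (ov.2.2.1 == "h" && ov.1 == row && col + length == ov.2.1) ||
          (ov.2.2.1 == "v" && decide (ov.1 ≤ row) && decide (row < ov.1 + ov.2.2.2) && ov.2.1 == col + length))))
    = pvBlockedLeft (vehicles.map (pvReflect width)) (pvReflect width (row, col, "h", length)) := by
  have hv : pvReflect width (row, col, "h", length) = (row, width + 2 - col - length, "h", length) := by
    simp [pvReflect]
  rw [hv]
  simp only [pvBlockedLeft, List.any_map]
  by_cases hg : col + length > width
  · rw [if_pos hg, if_pos (by omega : width + 2 - col - length ≤ 1)]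
  · rw [if_neg hg, if_neg (by omega : ¬ width + 2 - col - length ≤ 1)]
    refine pv_any_congr _ _ _ (fun ov => ?_)
    rw [pv_right_pt row col length width ov]
    rfl

-- branch lemma: A's up branch equals the kernel on the transposed board
lemma pv_up_case (vehicles : List (Int × Int × String × Int)) (row col length : Int) :
    (if row ≤ 1 then true
     else vehicles.any (fun ov =>
        ov != (row, col, "v", length) && (
          (ov.2.2.1 == "v" && ov.2.1 == col && ov.1 + ov.2.2.2 == row) ||
          (ov.2.2.1 == "h" && decide (ov.2.1 ≤ col) && decide (col < ov.2.1 + ov.2.2.2) && ov.1 == row - 1))))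
    = pvBlockedLeft (vehicles.map pvTranspose) (pvTranspose (row, col, "v", length)) := by
  have hv : pvTranspose (row, col, "v", length) = (col, row, "h", length) := by
    simp [pvTranspose]
  rw [hv]
  simp only [pvBlockedLeft, List.any_map]
  by_cases hg : row ≤ 1
  · rw [if_pos hg, if_pos hg]
  · rw [if_neg hg, if_neg hg]
    refine pv_any_congr _ _ _ (fun ov => ?_)
    rw [pv_up_pt row col length ov]
    rfl

-- branch lemma: A's down branch equals the kernel on the transposed then reflected board
lemma pv_down_case (vehicles : List (Int × Int × String × Int)) (row col length height : Int) :
    (if row + length > height then true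
     else vehicles.any (fun ov =>
        ov != (row, col, "v", length) && (
          (ov.2.2.1 == "v" && ov.2.1 == col && row + length == ov.1) ||
          (ov.2.2.1 == "h" && decide (ov.2.1 ≤ col) && decide (col < ov.2.1 + ov.2.2.2) && ov.1 == row + length))))
    = pvBlockedLeft ((vehicles.map pvTranspose).map (pvReflect height))
        (pvReflect height (pvTranspose (row, col, "v", length))) := by
  have hv : pvReflect height (pvTranspose (row, col, "v", length))
      = (col, height + 2 - row - length, "h", length) := by
    simp [pvTranspose, pvReflect]
  rw [hv]
  simp only [pvBlockedLeft, List.any_map]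
  by_cases hg : row + length > height
  · rw [if_pos hg, if_pos (by omega : height + 2 - row - length ≤ 1)]
  · rw [if_neg hg, if_neg (by omega : ¬ height + 2 - row - length ≤ 1)]
    refine pv_any_congr _ _ _ (fun ov => ?_)
    rw [pv_down_pt row col length height ov]
    rfl

-- ===== VERDICT (by name: the statement is the Claim_ definition above) =====
theorem is_vehicle_blocked_spec : Claim_equal_is_vehicle_blocked := by
  intro vehicles vehicle direction height width _
  unfold Spec_is_vehicle_blocked is_vehicle_blocked is_vehicle_blocked_alt
  obtain ⟨row, col, orientation, length⟩ := vehicle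
  by_cases hh : orientation = "h"
  · subst hh
    by_cases hl : direction = "left"
    · subst hl
      simp only [pvBlockedLeft]
      simp
    · by_cases hr : direction = "right"
      · subst hr
        simp only [show (("h" : String) == "h") = true from rfl,
          show (("right" : String) == "left") = false from rfl,
          show (("h" : String) == "v") = false from rfl,
          show (("right" : String) == "right") = true from rfl,
          if_true, if_false, Bool.false_eq_true]
        exact pv_right_case vehicles row col length width
      · simp [hl, hr]
  · by_cases hvv : orientation = "v"
    · subst hvv
      by_cases hu : direction = "up"
      · subst hu
        simp only [show (("v" : String) == "h") = false from rfl,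
          show (("v" : String) == "v") = true from rfl,
          show (("up" : String) == "up") = true from rfl,
          show (("up" : String) == "down") = false from rfl,
          Bool.true_or, if_true, if_false, Bool.false_eq_true]
        exact pv_up_case vehicles row col length
      · by_cases hd : direction = "down"
        · subst hd
          simp only [show (("v" : String) == "h") = false from rfl,
            show (("v" : String) == "v") = true from rfl,
            show (("down" : String) == "up") = false from rfl,
            show (("down" : String) == "down") = true from rfl,
            Bool.false_or, if_true, if_false, Bool.false_eq_true]
          exact pv_down_case vehicles row col length height
        · simp [hu, hd]
    · simp [hh, hvv]
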